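-- pv_equiv track=rewrite | github.com/naauaoyang/digital-wallet | src/antifraud.py | feature2
-- ===== SOURCE A (Python) =====
-- def feature2(line, friend):
--     info = line.split(',')
--     if len(info) > 3:
--         id1 = info[1]
--         id2 = info[2]
--         if id1 not in friend or id2 not in friend:
--             return False
--         elif id2 in friend[id1]:
--             return True
--         else:
--             for i in friend[id1].keys():
--                 if id2 in friend[i]:
--                     return True
--     else:
--         return False
-- ===== SOURCE B (Python) =====
-- def feature2(line, friend):
--     # B: reverse-direction check. A walks id1's neighbours asking each "do you
--     # know id2?"; B instead scans the whole friend table once to collect the set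
--     # of accounts that know id2, then tests that set against id1's neighbours
--     # with one disjointness test.  Implicit None fall-through kept.
--     info = line.split(',')
--     if len(info) <= 3:
--         return False
--     id1, id2 = info[1], info[2]
--     if id1 not in friend or id2 not in friend:
--         return False
--     if id2 in friend[id1]:
--         return True
--     knows_id2 = {k for k, v in friend.items() if id2 in v}
--     if not knows_id2.isdisjoint(friend[id1]):
--         return True
-- ===== Notes on version B (the rewrite author's own statement) =====
-- stated objective: alternative
-- what changed: A walks id1's neighbour list asking each neighbour's dict whether it contains id2 (early return on first hit); B reverses the direction: one pass over the whole friend table builds the set of accounts that know id2, and a single set-disjointness test against id1's neighbours decides, keeping the implicit None fall-through.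
-- crash fix: A raises KeyError when its loop reaches a neighbour of id1 that is not a key of friend before any second-hop hit; B never looks up missing neighbours and returns its normal value there (True on a hit, None otherwise). — e.g. on feature2("t,a,b,x", [("a", [("c", 1)]), ("b", []), ("z", [("b", 2)])]): A raises KeyError, B returns none
import Mathlib
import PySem

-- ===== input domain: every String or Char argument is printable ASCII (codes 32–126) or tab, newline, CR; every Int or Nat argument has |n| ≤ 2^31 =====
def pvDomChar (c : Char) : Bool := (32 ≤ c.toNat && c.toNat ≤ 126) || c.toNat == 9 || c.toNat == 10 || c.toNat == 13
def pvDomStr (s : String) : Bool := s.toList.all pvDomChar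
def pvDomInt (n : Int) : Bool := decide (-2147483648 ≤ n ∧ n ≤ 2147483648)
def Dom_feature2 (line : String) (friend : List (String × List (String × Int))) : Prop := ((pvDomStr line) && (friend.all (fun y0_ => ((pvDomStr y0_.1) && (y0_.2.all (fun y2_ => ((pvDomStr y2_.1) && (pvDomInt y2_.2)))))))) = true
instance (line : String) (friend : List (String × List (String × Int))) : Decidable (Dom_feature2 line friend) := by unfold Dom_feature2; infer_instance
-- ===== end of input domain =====

-- B replaces A's forward scan over id1's neighbours by a reverse-direction pass: it
-- scans the whole friend table once to build the set of accounts that know id2, then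
-- does one disjointness test against id1's neighbours (alternative algorithm, not faster).


-- "account k exists and id2 is in k's friend dict" — used by Pre_/Raises_ and the lemmas
def hitW (fr : PySem.Dict String (List (String × Int))) (id2 k : String) : Bool :=
  match fr.get? k with
  | none => false
  | some dk => (PySem.Dict.mk dk).contains id2

-- ===== PORT A =====
-- the for-loop 'for i in friend[id1].keys(): if id2 in friend[i]: return True'
-- (fall-through = Python None = none; friend[i] missing = KeyError, excluded by Pre_)
def feature2Loop (fr : PySem.Dict String (List (String × Int))) (id2 : String) :
    List String → Option Bool
  | [] => none
  | i :: rest =>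
    match fr.get? i with
    | none => none  -- KeyError in Python; outside Pre_feature2
    | some di =>
      if (PySem.Dict.mk di).contains id2 then some true else feature2Loop fr id2 rest

def feature2 (line : String) (friend : List (String × List (String × Int))) : Option Bool :=
  let fr : PySem.Dict String (List (String × Int)) := PySem.Dict.mk friend
  let info := (PySem.Str.split? line ",").getD []  -- sep "," ≠ "" so split? = some: exact
  if info.length > 3 then
    let id1 := (PySem.List.pyGet? info 1).getD ""  -- in range: info.length > 3
    let id2 := (PySem.List.pyGet? info 2).getD ""
    match fr.get? id1 with
    | none => some false                            -- id1 not in friend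
    | some d1 =>
      if !fr.contains id2 then some false           -- id2 not in friend
      else if (PySem.Dict.mk d1).contains id2 then some true
      else feature2Loop fr id2 (PySem.Dict.keys (PySem.Dict.mk d1))
  else some false

-- ===== PORT B =====
def feature2_alt (line : String) (friend : List (String × List (String × Int))) : Option Bool :=
  let fr : PySem.Dict String (List (String × Int)) := PySem.Dict.mk friend
  let info := (PySem.Str.split? line ",").getD []  -- sep "," ≠ "" so split? = some: exact
  if info.length ≤ 3 then some false
  else
    let id1 := (PySem.List.pyGet? info 1).getD ""  -- in range: info.length > 3
    let id2 := (PySem.List.pyGet? info 2).getD ""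
    match fr.get? id1 with
    | none => some false
    | some d1 =>
      if !fr.contains id2 then some false
      else if (PySem.Dict.mk d1).contains id2 then some true
      else
        -- knows_id2 = {k for k, v in friend.items() if id2 in v}
        let knows : PySem.Set String :=
          PySem.Set.ofList
            ((fr.items.filter (fun kv => (PySem.Dict.mk kv.2).contains id2)).map Prod.fst)
        -- if not knows_id2.isdisjoint(friend[id1]): return True   (set vs dict keys:
        -- disjointness is order-independent, so iterating either side is exact)
        if !(PySem.Set.isdisjoint knows (PySem.Dict.keys (PySem.Dict.mk d1))) then some true
        else none

-- ===== PRECONDITION & SPEC =====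
-- Pre_ excludes (a) association lists whose outer keys are not distinct — a Python dict
-- cannot carry duplicate keys, so the first-vs-last-match corner of the encoding is
-- anybody's — and (b) the inputs on which A RAISES KeyError: its loop meets a neighbour
-- of id1 that is not a key of friend before any second-hop hit.
def Pre_feature2 (line : String) (friend : List (String × List (String × Int))) : Prop :=
  (friend.map Prod.fst).Nodup ∧
  (let info := (PySem.Str.split? line ",").getD []
   let fr : PySem.Dict String (List (String × Int)) := PySem.Dict.mk friend
   let id2 := (PySem.List.pyGet? info 2).getD ""
   let d1 := (fr.get? ((PySem.List.pyGet? info 1).getD "")).getD []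
   let ks := PySem.Dict.keys (PySem.Dict.mk d1)
   info.length > 3 →
     fr.contains id2 = true →
     (PySem.Dict.mk d1).contains id2 = false →
     ∀ p < ks.length, fr.contains (ks.getD p "") = false →
       ∃ j < p, hitW fr id2 (ks.getD j "") = true)
instance (line : String) (friend : List (String × List (String × Int))) : Decidable (Pre_feature2 line friend) := by unfold Pre_feature2; infer_instance

def pvWitness_feature2 : String × (List (String × List (String × Int))) :=
  ("t,a,b,x", [("a", [("c", 1)]), ("b", []), ("c", [("b", 2)])])

-- A raises KeyError when its loop reaches a neighbour of id1 missing from friend before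
-- any second-hop hit; B, which never looks up missing neighbours, returns its normal
-- value there (True on a later hit, None otherwise).
def Raises_feature2 (line : String) (friend : List (String × List (String × Int))) : Prop :=
  let info := (PySem.Str.split? line ",").getD []
  let fr : PySem.Dict String (List (String × Int)) := PySem.Dict.mk friend
  let id2 := (PySem.List.pyGet? info 2).getD ""
  let d1 := (fr.get? ((PySem.List.pyGet? info 1).getD "")).getD []
  let ks := PySem.Dict.keys (PySem.Dict.mk d1)
  info.length > 3 ∧
    fr.contains ((PySem.List.pyGet? info 1).getD "") = true ∧
    fr.contains id2 = true ∧
    (PySem.Dict.mk d1).contains id2 = false ∧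
    ∃ p < ks.length, fr.contains (ks.getD p "") = false ∧
      ∀ j < p, hitW fr id2 (ks.getD j "") = false
instance (line : String) (friend : List (String × List (String × Int))) : Decidable (Raises_feature2 line friend) := by unfold Raises_feature2; infer_instance

def pvRaiseWitness_feature2 : String × (List (String × List (String × Int))) :=
  ("t,a,b,x", [("a", [("c", 1)]), ("b", []), ("z", [("b", 2)])])
def pvRaiseWitnessOut_feature2 : Option Bool := none

def Spec_feature2 (line : String) (friend : List (String × List (String × Int))) (out : Option Bool) : Prop := out = feature2_alt line friend
instance (line : String) (friend : List (String × List (String × Int))) (out : Option Bool) : Decidable (Spec_feature2 line friend out) := by unfold Spec_feature2; infer_instance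

-- ===== CLAIM =====
def Claim_equal_feature2 : Prop := ∀ (line : String) (friend : List (String × List (String × Int))), Dom_feature2 line friend → Pre_feature2 line friend → Spec_feature2 line friend (feature2 line friend)
def Claim_raises_feature2 : Prop := (∀ (line : String) (friend : List (String × List (String × Int))), Dom_feature2 line friend → Raises_feature2 line friend → ¬ Pre_feature2 line friend) ∧ (Dom_feature2 (pvRaiseWitness_feature2.1) (pvRaiseWitness_feature2.2) ∧ Raises_feature2 (pvRaiseWitness_feature2.1) (pvRaiseWitness_feature2.2) ∧ feature2_alt (pvRaiseWitness_feature2.1) (pvRaiseWitness_feature2.2) = pvRaiseWitnessOut_feature2)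

-- ===== LEMMAS AND PROOFS =====

-- A's scan, when it cannot raise (every missing neighbour is preceded by a hit),
-- equals "does any scanned key satisfy hitW"
theorem loop_eq_any (fr : PySem.Dict String (List (String × Int))) (id2 : String)
    (l : List String)
    (h : ∀ p < l.length, fr.contains (l.getD p "") = false →
          ∃ j < p, hitW fr id2 (l.getD j "") = true) :
    feature2Loop fr id2 l = if l.any (hitW fr id2) then some true else none := by
  induction l with
  | nil => simp [feature2Loop]
  | cons i rest ih =>
    rcases hg : fr.get? i with _ | di
    · exfalso
      have hc : fr.contains i = false := by
        rw [PySem.Dict.contains_eq_isSome_get?, hg]; rfl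
      obtain ⟨j, hj, _⟩ := h 0 (by simp) (by simpa using hc)
      omega
    · simp only [feature2Loop, hg]
      by_cases hm : (PySem.Dict.mk di).contains id2 = true
      · rw [if_pos hm]
        have hh : hitW fr id2 i = true := by simp [hitW, hg, hm]
        simp [List.any_cons, hh]
      · have hiF : hitW fr id2 i = false := by
          simp only [hitW, hg]
          exact Bool.not_eq_true _ ▸ (by simpa using hm)
        rw [if_neg hm]
        have h' : ∀ p < rest.length, fr.contains (rest.getD p "") = false →
            ∃ j < p, hitW fr id2 (rest.getD j "") = true := by
          intro p hp hcp
          obtain ⟨j, hj, hhit⟩ := h (p + 1) (by simp; omega)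
            (by simpa [List.getD_cons_succ] using hcp)
          cases j with
          | zero =>
            rw [List.getD_cons_zero, hiF] at hhit
            cases hhit
          | succ j' =>
            exact ⟨j', by omega, by simpa [List.getD_cons_succ] using hhit⟩
        rw [ih h']
        simp [List.any_cons, hiF]

-- the reverse index: an element of l hits iff l meets the set of accounts that know id2
theorem any_hit_eq_not_isdisjoint (fr : PySem.Dict String (List (String × Int)))
    (id2 : String) (l : List String) (hnd : fr.keys.Nodup) :
    l.any (hitW fr id2) =
      !(PySem.Set.isdisjoint
          (PySem.Set.ofList
            ((fr.items.filter (fun kv => (PySem.Dict.mk kv.2).contains id2)).map Prod.fst)) l) := by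
  rw [Bool.eq_iff_iff]
  rw [List.any_eq_true]
  constructor
  · intro ⟨k, hk, hhit⟩
    simp only [hitW] at hhit
    rcases hg : fr.get? k with _ | dk
    · rw [hg] at hhit; cases hhit
    · rw [hg] at hhit
      have hmemItems : (k, dk) ∈ fr.items := PySem.Dict.mem_items_of_get?_eq_some (d := fr) hg
      have hknows : k ∈ PySem.Set.ofList
          ((fr.items.filter (fun kv => (PySem.Dict.mk kv.2).contains id2)).map Prod.fst) := by
        rw [PySem.Set.mem_ofList]
        exact List.mem_map.mpr ⟨(k, dk), List.mem_filter.mpr ⟨hmemItems, hhit⟩, rfl⟩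
      simp only [Bool.not_eq_true']
      rcases hd : PySem.Set.isdisjoint _ l with _ | _
      · rfl
      · exact absurd hk ((PySem.Set.isdisjoint_iff _ _).mp hd k hknows)
  · intro hd
    simp only [Bool.not_eq_true'] at hd
    have : ¬ (∀ x ∈ PySem.Set.ofList
        ((fr.items.filter (fun kv => (PySem.Dict.mk kv.2).contains id2)).map Prod.fst), x ∉ l) := by
      intro hall
      rw [(PySem.Set.isdisjoint_iff _ _).mpr hall] at hd
      cases hd
    push Not at this
    obtain ⟨k, hknows, hkl⟩ := this
    rw [PySem.Set.mem_ofList] at hknows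
    obtain ⟨kv, hkv, hfst⟩ := List.mem_map.mp hknows
    obtain ⟨hmemItems, hcont⟩ := List.mem_filter.mp hkv
    refine ⟨k, hkl, ?_⟩
    have hget : fr.get? k = some kv.2 := by
      rw [PySem.Dict.get?_eq_some_iff_mem_items _ _ _ hnd]
      rw [← hfst]
      exact hmemItems
    simp [hitW, hget, hcont]

-- ===== VERDICT =====
theorem feature2_spec : Claim_equal_feature2 := by
  intro line friend _ hpre
  obtain ⟨hnodup, hpre⟩ := hpre
  unfold Spec_feature2 feature2 feature2_alt
  simp only []
  set fr : PySem.Dict String (List (String × Int)) := PySem.Dict.mk friend with hfr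
  set info := (PySem.Str.split? line ",").getD [] with hinfo
  by_cases hlen : info.length > 3
  · rw [if_pos hlen, if_neg (by omega)]
    set id1 := (PySem.List.pyGet? info 1).getD "" with hid1
    set id2 := (PySem.List.pyGet? info 2).getD "" with hid2
    rcases hget : fr.get? id1 with _ | d1
    · rfl
    · simp only []
      by_cases hc2 : fr.contains id2 = true
      · have hB : ¬ ((!fr.contains id2) = true) := by simp [hc2]
        rw [if_neg hB, if_neg hB]
        by_cases hin : (PySem.Dict.mk d1).contains id2 = true
        · rw [if_pos hin, if_pos hin]
        · rw [if_neg hin, if_neg hin]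
          have hin' : (PySem.Dict.mk d1).contains id2 = false := by
            cases h : (PySem.Dict.mk d1).contains id2 with
            | false => rfl
            | true => exact absurd h hin
          have hcond := hpre hlen hc2
          rw [hget, Option.getD_some] at hcond
          have hcond := hcond hin'
          have hndk : fr.keys.Nodup := by
            have : fr.keys = friend.map Prod.fst := by
              rw [hfr]; exact PySem.Dict.keys_mk friend
            rw [this]; exact hnodup
          rw [loop_eq_any fr id2 _ hcond,
              any_hit_eq_not_isdisjoint fr id2 _ hndk]
      · have hB : (!fr.contains id2) = true := by
          simp [Bool.not_eq_true] at hc2 ⊢; exact hc2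
        rw [if_pos hB, if_pos hB]
  · rw [if_neg hlen, if_pos (by omega)]

theorem feature2_raises : Claim_raises_feature2 := by
  unfold Claim_raises_feature2
  refine ⟨?_, by decide⟩
  intro line friend _ hr hpre
  obtain ⟨hlen, _, hc2, hin, p, hp, hmiss, hnohit⟩ := hr
  obtain ⟨_, hcond⟩ := hpre
  obtain ⟨j, hj, hhit⟩ := hcond hlen hc2 hin p hp hmiss
  rw [hnohit j hj] at hhit
  cases hhit

-- self-check that the raise witness satisfies Raises_ (pvWitness_-style witness check)
theorem feature2_raises_witness_ok : Raises_feature2 (pvRaiseWitness_feature2.1) (pvRaiseWitness_feature2.2) ∧ feature2_alt (pvRaiseWitness_feature2.1) (pvRaiseWitness_feature2.2) = pvRaiseWitnessOut_feature2 := (feature2_raises).2.2
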